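-- pv_equiv track=rewrite | github.com/glory-com/python_mid_exam | 期中考试/09.py | sorted_with_weird_order2
-- ===== SOURCE A (Python) =====
-- def sorted_with_weird_order2(string_list):
--     dic = {}
--     for i in string_list :
--         for ch in i :
--             if ch in dic :
--                 dic[ch] += 1
--             else :
--                 dic[ch] = 1
--
--     dic = dict(sorted(dic.items() , key = lambda x : (-x[1] , x[0])))
--     dic = list(dic.keys())
--
--
--
--     def cmp(a) :
--         ans = []
--
--         for i in a :
--             ans.append(dic.index(i))
--
--         return tuple(ans)
--
--
--
--     ans = sorted(string_list , key = cmp)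
--
--     return ans
-- ===== SOURCE B (Python) =====
-- def sorted_with_weird_order2(string_list):
--     count = {}
--     for s in string_list:
--         for ch in s:
--             count[ch] = count.get(ch, 0) + 1
--     return sorted(string_list,
--                   key=lambda s: tuple(x for ch in s for x in (-count[ch], ord(ch))))
-- ===== Notes on version B (the rewrite author's own statement) =====
-- stated objective: simpler
-- what changed: B drops A's intermediate pass that sorts the distinct characters into a ranked list and then looks each character up with list.index; it sorts the strings directly by the flattened (-frequency, codepoint) key, which orders exactly like A's rank tuples.
import Mathlib
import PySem

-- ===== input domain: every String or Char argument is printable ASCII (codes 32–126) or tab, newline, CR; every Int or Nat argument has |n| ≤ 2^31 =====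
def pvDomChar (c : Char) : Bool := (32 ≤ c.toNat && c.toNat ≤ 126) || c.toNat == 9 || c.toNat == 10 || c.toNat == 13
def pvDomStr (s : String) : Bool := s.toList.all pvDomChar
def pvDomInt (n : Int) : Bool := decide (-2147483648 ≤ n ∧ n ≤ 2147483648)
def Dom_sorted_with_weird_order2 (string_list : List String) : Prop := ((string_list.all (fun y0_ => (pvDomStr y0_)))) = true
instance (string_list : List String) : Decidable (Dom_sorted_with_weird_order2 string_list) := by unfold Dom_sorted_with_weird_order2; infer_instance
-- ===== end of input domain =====

-- B replaces A's ranked-char-list + per-char list.index lookups by sorting directly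
-- on the flattened (-frequency, codepoint) key (objective: simpler).

-- ===== PORT A =====
-- the counting loop: 'if ch in dic: dic[ch] += 1 else: dic[ch] = 1'
def pvCountA (string_list : List String) : PySem.Dict Char Int :=
  string_list.foldl (fun dic i =>
    i.toList.foldl (fun dic ch =>
      if dic.contains ch then dic.modify ch 0 (· + 1) else dic.insert ch 1) dic)
    PySem.Dict.empty

-- dic = list(dict(sorted(dic.items(), key=lambda x: (-x[1], x[0]))).keys())
def pvDicA (string_list : List String) : List Char :=
  (PySem.Dict.ofList
    (PySem.List.sorted2 (pvCountA string_list).items (fun x => -x.2) (fun x => x.1))).keys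

-- cmp(a): append dic.index(ch) for each ch; index? is always some here (every char of the
-- input is a key of dic), so '.getD 0' marks Python's unreachable ValueError branch
def pvCmpA (dic : List Char) (a : String) : List Int :=
  a.toList.foldl (fun ans i => ans ++ [(((PySem.List.index? dic i).getD 0 : Nat) : Int)]) []

def sorted_with_weird_order2 (string_list : List String) : List String :=
  PySem.List.sorted string_list (pvCmpA (pvDicA string_list)) false

-- ===== PORT B =====
-- count[ch] = count.get(ch, 0) + 1
def pvCountB (string_list : List String) : PySem.Dict Char Int :=
  string_list.foldl (fun count s =>
    s.toList.foldl (fun count ch => count.insert ch (count.getD ch 0 + 1)) count)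
    PySem.Dict.empty

-- key = tuple(x for ch in s for x in (-count[ch], ord(ch)))
def pvKeyB (count : PySem.Dict Char Int) (s : String) : List Int :=
  s.toList.flatMap (fun ch => [-(count.getD ch 0), (ch.toNat : Int)])

def sorted_with_weird_order2_alt (string_list : List String) : List String :=
  PySem.List.sorted string_list (pvKeyB (pvCountB string_list)) false

-- ===== PRECONDITION & SPEC =====
def Spec_sorted_with_weird_order2 (string_list : List String) (out : List String) : Prop := out = sorted_with_weird_order2_alt string_list
instance (string_list : List String) (out : List String) : Decidable (Spec_sorted_with_weird_order2 string_list out) := by unfold Spec_sorted_with_weird_order2; infer_instance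

-- ===== CLAIM (what is proved, stated in full; the proofs are below) =====
def Claim_equal_sorted_with_weird_order2 : Prop := ∀ (string_list : List String), Dom_sorted_with_weird_order2 string_list → Spec_sorted_with_weird_order2 string_list (sorted_with_weird_order2 string_list)

-- ===== LEMMAS AND PROOFS =====

-- all characters of the input, in order
def pvAllChars (string_list : List String) : List Char :=
  string_list.flatMap String.toList

-- the frequency of a character in the whole input
def pvCnt (xs : List String) (c : Char) : Int := (List.count c (pvAllChars xs) : Int)

-- the strict order A ranks the distinct characters by: higher frequency first, ties by codepoint
def pvRc (cnt : Char → Int) (c d : Char) : Prop :=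
  -cnt c < -cnt d ∨ (-cnt c = -cnt d ∧ c < d)

-- A's counting loop is Counter over the concatenated characters
theorem pvCountA_eq_counter (xs : List String) :
    pvCountA xs = PySem.Dict.counter (pvAllChars xs) := by
  have hstep : ∀ (d : PySem.Dict Char Int) (ch : Char),
      (if d.contains ch then d.modify ch 0 (· + 1) else d.insert ch 1) = d.modify ch 0 (· + 1) := by
    intro d ch
    by_cases h : d.contains ch
    · simp [h]
    · simp only [Bool.not_eq_true] at h
      simp [h, PySem.Dict.modify, PySem.Dict.getD_of_not_contains _ _ h]
  unfold pvCountA pvAllChars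
  rw [PySem.Dict.counter_eq_foldl, List.foldl_flatMap]
  simp only [hstep]

-- B's counting loop counts the same
theorem pvCountB_getD (xs : List String) (c : Char) :
    (pvCountB xs).getD c 0 = (List.count c (pvAllChars xs) : Int) := by
  unfold pvCountB pvAllChars
  rw [← List.foldl_flatMap, PySem.Dict.getD_foldl_insert_add_one, PySem.Dict.getD_empty]
  ring

-- inserting with insertBy preserves Pairwise R when the comparator decides R against every element
theorem pvPairwise_insertBy {α : Type} (R : α → α → Prop) (before : α → α → Bool)
    (htrans : ∀ a b c, R a b → R b c → R a c)
    (x : α) (acc : List α)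
    (hxt : ∀ y ∈ acc, before x y = true → R x y)
    (hxf : ∀ y ∈ acc, before x y = false → R y x)
    (hp : acc.Pairwise R) :
    (PySem.List.insertBy before x acc).Pairwise R := by
  induction acc with
  | nil => simp [PySem.List.insertBy]
  | cons y ys ih =>
    rw [List.pairwise_cons] at hp
    obtain ⟨hy, hys⟩ := hp
    by_cases h : before x y = true
    · rw [PySem.List.insertBy, if_pos h]
      refine List.pairwise_cons.mpr ⟨?_, List.pairwise_cons.mpr ⟨hy, hys⟩⟩
      intro z hz
      rcases List.mem_cons.mp hz with rfl | hz
      · exact hxt z (by simp) h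
      · exact htrans _ _ _ (hxt y (by simp) h) (hy z hz)
    · rw [PySem.List.insertBy, if_neg h]
      refine List.pairwise_cons.mpr ⟨?_, ?_⟩
      · intro z hz
        rcases (PySem.List.insertBy_mem_iff before x z ys).mp hz with rfl | hz
        · exact hxf y (by simp) (by simpa using h)
        · exact hy z hz
      · exact ih (fun w hw ht => hxt w (by simp [hw]) ht)
          (fun w hw hf => hxf w (by simp [hw]) hf) hys

-- the insertion-sort fold of a Nodup list is Pairwise R when the comparator decides R on its pairs
theorem pvPairwise_foldl_insertBy {α : Type} (R : α → α → Prop) (before : α → α → Bool)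
    (htrans : ∀ a b c, R a b → R b c → R a c) :
    ∀ (l acc : List α), acc.Pairwise R → l.Nodup → (∀ x ∈ l, x ∉ acc) →
    (∀ p q, p ∈ l → (q ∈ acc ∨ q ∈ l) → p ≠ q →
      (before p q = true → R p q) ∧ (before p q = false → R q p)) →
    (l.foldl (fun acc x => PySem.List.insertBy before x acc) acc).Pairwise R := by
  intro l
  induction l with
  | nil => intro acc hp _ _ _; simpa using hp
  | cons x l' ih =>
    intro acc hp hnd hdisj hcond
    rw [List.foldl_cons]
    have hxacc : ∀ y ∈ acc, x ≠ y := by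
      intro y hy hxy; exact hdisj x (by simp) (hxy ▸ hy)
    apply ih
    · exact pvPairwise_insertBy R before htrans x acc
        (fun y hy => (hcond x y (by simp) (Or.inl hy) (hxacc y hy)).1)
        (fun y hy => (hcond x y (by simp) (Or.inl hy) (hxacc y hy)).2)
        hp
    · exact (List.nodup_cons.mp hnd).2
    · intro z hz hzmem
      rcases (PySem.List.insertBy_mem_iff before x z acc).mp hzmem with rfl | hzacc
      · exact (List.nodup_cons.mp hnd).1 hz
      · exact hdisj z (by simp [hz]) hzacc
    · intro p q hp' hq hpq
      refine hcond p q (by simp [hp']) ?_ hpq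
      rcases hq with hq | hq
      · rcases (PySem.List.insertBy_mem_iff before x q acc).mp hq with rfl | hq
        · exact Or.inr (by simp)
        · exact Or.inl hq
      · exact Or.inr (by simp [hq])

theorem pvSortedItems_perm (xs : List String) :
    (PySem.List.sorted2 (pvCountA xs).items (fun x => -x.2) (fun x => x.1)).Perm
      (pvCountA xs).items :=
  PySem.List.sorted2_perm _ _ _ _

theorem pvSortedItems_fst_nodup (xs : List String) :
    ((PySem.List.sorted2 (pvCountA xs).items (fun x => -x.2) (fun x => x.1)).map Prod.fst).Nodup := by
  have hperm := (pvSortedItems_perm xs).map Prod.fst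
  refine hperm.nodup_iff.mpr ?_
  rw [pvCountA_eq_counter]
  exact PySem.Dict.nodup_keys_counter _

-- dict(sorted(...)).keys() is just the keys of the sorted items, in order
theorem pvDicA_eq (xs : List String) :
    pvDicA xs =
      (PySem.List.sorted2 (pvCountA xs).items (fun x => -x.2) (fun x => x.1)).map Prod.fst := by
  unfold pvDicA
  have h := PySem.Dict.items_foldl_insert_fresh
    (PySem.List.sorted2 (pvCountA xs).items (fun x => -x.2) (fun x => x.1))
    (fun p : Char × Int => p.1) (fun p => p.2) PySem.Dict.empty
    (fun a _ => PySem.Dict.contains_empty a.1) (pvSortedItems_fst_nodup xs)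
  rw [PySem.Dict.ofList, PySem.Dict.update, PySem.Dict.keys]
  simp only [h]
  simp [PySem.Dict.empty]

theorem pvDicA_mem (xs : List String) (c : Char) :
    c ∈ pvDicA xs ↔ c ∈ pvAllChars xs := by
  rw [pvDicA_eq, ((pvSortedItems_perm xs).map Prod.fst).mem_iff, pvCountA_eq_counter]
  have hk : (PySem.Dict.counter (pvAllChars xs)).items.map Prod.fst
      = PySem.Set.ofList (pvAllChars xs) := by
    rw [← PySem.Dict.keys_counter]; rfl
  rw [hk, PySem.Set.mem_ofList]

theorem pvItems_shape (xs : List String) :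
    ∀ p ∈ (pvCountA xs).items, p = (p.1, pvCnt xs p.1) := by
  rw [pvCountA_eq_counter, PySem.Dict.items_counter]
  intro p hp
  obtain ⟨k, _, rfl⟩ := List.mem_map.mp hp
  simp [pvCnt]

-- dic lists the distinct characters strictly ordered by pvRc
theorem pvDicA_pairwise (xs : List String) :
    (pvDicA xs).Pairwise (pvRc (pvCnt xs)) := by
  rw [pvDicA_eq, List.pairwise_map]
  have hRI : (PySem.List.sorted2 (pvCountA xs).items (fun x => -x.2) (fun x => x.1)).Pairwise
      (fun p q : Char × Int => -p.2 < -q.2 ∨ (-p.2 = -q.2 ∧ p.1 < q.1)) := by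
    have hdef : PySem.List.sorted2 (pvCountA xs).items (fun x => -x.2) (fun x => x.1)
        = (pvCountA xs).items.foldl (fun acc x => PySem.List.insertBy
            (fun a b : Char × Int =>
              decide (-a.2 < -b.2) || (!decide (-b.2 < -a.2) && decide (a.1 < b.1))) x acc) [] := rfl
    rw [hdef]
    have hnd : (pvCountA xs).items.Nodup := by
      have h1 : ((pvCountA xs).items.map Prod.fst).Nodup := by
        rw [pvCountA_eq_counter]; exact PySem.Dict.nodup_keys_counter _
      exact h1.of_map
    apply pvPairwise_foldl_insertBy
    · intro a b c hab hbc
      rcases hab with h | ⟨h1, h2⟩ <;> rcases hbc with h' | ⟨h1', h2'⟩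
      · exact Or.inl (lt_trans h h')
      · exact Or.inl (h1' ▸ h)
      · exact Or.inl (h1 ▸ h')
      · exact Or.inr ⟨h1.trans h1', lt_trans h2 h2'⟩
    · exact List.Pairwise.nil
    · exact hnd
    · simp
    · intro p q hp hq hpq
      have hq' : q ∈ (pvCountA xs).items := by
        rcases hq with h | h
        · exact absurd h List.not_mem_nil
        · exact h
      have hfst : p.1 ≠ q.1 := by
        intro h
        apply hpq
        rw [pvItems_shape xs p hp, pvItems_shape xs q hq', h]
      constructor
      · intro hb
        simp only [Bool.or_eq_true, Bool.and_eq_true, Bool.not_eq_true', decide_eq_true_eq,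
          decide_eq_false_iff_not] at hb
        rcases hb with h | ⟨h1, h2⟩
        · exact Or.inl h
        · rcases lt_or_eq_of_le (not_lt.mp h1) with h | h
          · exact Or.inl h
          · exact Or.inr ⟨h, h2⟩
      · intro hb
        simp only [Bool.or_eq_false_iff, Bool.and_eq_false_iff, Bool.not_eq_false',
          decide_eq_true_eq, decide_eq_false_iff_not] at hb
        obtain ⟨h1, h2⟩ := hb
        rcases lt_or_eq_of_le (not_lt.mp h1) with h | h
        · exact Or.inl h
        · rcases h2 with h2 | h2
          · exact Or.inl h2
          · rcases lt_or_gt_of_ne hfst with hc | hc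
            · exact absurd hc h2
            · exact Or.inr ⟨h, hc⟩
  refine hRI.imp_of_mem ?_
  intro p q hp hq h
  have hp' := pvItems_shape xs p ((pvSortedItems_perm xs).mem_iff.mp hp)
  have hq' := pvItems_shape xs q ((pvSortedItems_perm xs).mem_iff.mp hq)
  unfold pvRc
  rw [hp', hq'] at h
  simpa using h

theorem pvIndex_getElem (l : List Char) (c : Char) (h : c ∈ l) :
    ∃ i, ∃ hi : i < l.length, l[i] = c ∧ PySem.List.index? l c = some i := by
  have hs : (PySem.List.index? l c).isSome := by
    rw [PySem.List.index?_isSome_iff]; exact h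
  obtain ⟨k, hk⟩ := Option.isSome_iff_exists.mp hs
  obtain ⟨pre, suf, hl, hlen, _⟩ := (PySem.List.index?_eq_some_iff l c k).mp hk
  subst hl
  refine ⟨k, ?_, ?_, hk⟩
  · rw [List.length_append, ← hlen]; simp
  · subst hlen
    rw [List.getElem_append_right (Nat.le_refl _)]
    simp

theorem pvRc_irrefl (cnt : Char → Int) (c : Char) : ¬ pvRc cnt c c := by
  intro h
  rcases h with h | ⟨_, h⟩
  · exact lt_irrefl _ h
  · exact lt_irrefl _ h

theorem pvRc_asymm (cnt : Char → Int) (c d : Char) : pvRc cnt c d → pvRc cnt d c → False := by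
  intro h h'
  rcases h with h | ⟨h1, h2⟩ <;> rcases h' with h' | ⟨h1', h2'⟩
  · exact lt_irrefl _ (lt_trans h h')
  · exact lt_irrefl _ (h1' ▸ h)
  · exact lt_irrefl _ (h1 ▸ h')
  · exact lt_irrefl _ (lt_trans h2 h2')

-- positions in dic compare exactly like the (-frequency, char) rank, and are injective
theorem pvFA_facts (xs : List String) (c d : Char) (hc : c ∈ pvDicA xs) (hd : d ∈ pvDicA xs) :
    ((((PySem.List.index? (pvDicA xs) c).getD 0 : Nat) : Int)
        < (((PySem.List.index? (pvDicA xs) d).getD 0 : Nat) : Int) ↔ pvRc (pvCnt xs) c d)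
    ∧ ((((PySem.List.index? (pvDicA xs) c).getD 0 : Nat) : Int)
        = (((PySem.List.index? (pvDicA xs) d).getD 0 : Nat) : Int) ↔ c = d) := by
  obtain ⟨i, hi, hic, hieq⟩ := pvIndex_getElem _ c hc
  obtain ⟨j, hj, hjc, hjeq⟩ := pvIndex_getElem _ d hd
  have hRij : ∀ a b (ha : a < (pvDicA xs).length) (hb : b < (pvDicA xs).length), a < b →
      pvRc (pvCnt xs) (pvDicA xs)[a] (pvDicA xs)[b] :=
    List.pairwise_iff_getElem.mp (pvDicA_pairwise xs)
  rw [hieq, hjeq]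
  simp only [Option.getD_some, Nat.cast_lt, Nat.cast_inj]
  constructor
  · constructor
    · intro h
      have := hRij i j hi hj h
      rwa [hic, hjc] at this
    · intro hR
      rcases lt_trichotomy i j with h | h | h
      · exact h
      · exfalso
        subst h
        rw [hic] at hjc
        subst hjc
        exact pvRc_irrefl _ _ hR
      · exfalso
        have := hRij j i hj hi h
        rw [hic, hjc] at this
        exact pvRc_asymm _ _ _ hR this
  · constructor
    · intro h
      subst h
      rw [hic] at hjc
      exact hjc
    · intro h
      subst h
      rcases lt_trichotomy i j with h | h | h
      · exfalso
        have := hRij i j hi hj h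
        rw [hic, hjc] at this
        exact pvRc_irrefl _ _ this
      · exact h
      · exfalso
        have := hRij j i hj hi h
        rw [hic, hjc] at this
        exact pvRc_irrefl _ _ this

-- rank-index tuples and flattened (-frequency, codepoint) tuples compare identically
theorem pvLex_equiv (cnt : Char → Int) (fA : Char → Int) (S : List Char)
    (hlt : ∀ c ∈ S, ∀ d ∈ S, (fA c < fA d ↔ pvRc cnt c d))
    (heq : ∀ c ∈ S, ∀ d ∈ S, (fA c = fA d ↔ c = d)) :
    ∀ u v : List Char, (∀ c ∈ u, c ∈ S) → (∀ c ∈ v, c ∈ S) →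
      (u.map fA < v.map fA ↔
        u.flatMap (fun c => [-cnt c, (c.toNat : Int)]) < v.flatMap (fun c => [-cnt c, (c.toNat : Int)])) := by
  intro u
  induction u with
  | nil =>
    intro v _ _
    cases v with
    | nil => exact Iff.rfl
    | cons d v' =>
      simp only [List.map_nil, List.map_cons, List.flatMap_nil, List.flatMap_cons, List.cons_append]
      exact iff_of_true (List.nil_lt_cons _ _) (List.nil_lt_cons _ _)
  | cons c u' ih =>
    intro v hu hv
    cases v with
    | nil =>
      simp only [List.map_cons, List.map_nil, List.flatMap_cons, List.flatMap_nil, List.cons_append]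
      exact iff_of_false (List.not_lt_nil _) (List.not_lt_nil _)
    | cons d v' =>
      have hcS : c ∈ S := hu c (by simp)
      have hdS : d ∈ S := hv d (by simp)
      have hih := ih v' (fun z hz => hu z (by simp [hz])) (fun z hz => hv z (by simp [hz]))
      simp only [List.map_cons, List.flatMap_cons, List.cons_append]
      rw [List.cons_lt_cons_iff, List.cons_lt_cons_iff, List.cons_lt_cons_iff]
      have h1 := hlt c hcS d hdS
      have h2 := heq c hcS d hdS
      have hord : c < d ↔ (c.toNat : Int) < (d.toNat : Int) := by
        constructor
        · intro h; exact_mod_cast h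
        · intro h; exact_mod_cast h
      have hordeq : c = d ↔ (c.toNat : Int) = (d.toNat : Int) := by
        constructor
        · intro h; rw [h]
        · intro h
          have h' : c.toNat = d.toNat := by exact_mod_cast h
          rw [← Char.ofNat_toNat c, ← Char.ofNat_toNat d, h']
      constructor
      · intro h
        rcases h with h | ⟨h, htail⟩
        · rcases h1.mp h with hr | ⟨hreq, hrc⟩
          · exact Or.inl hr
          · exact Or.inr ⟨hreq, Or.inl (hord.mp hrc)⟩
        · have hcd := h2.mp h
          subst hcd
          exact Or.inr ⟨rfl, Or.inr ⟨rfl, hih.mp htail⟩⟩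
      · intro h
        rcases h with h | ⟨h, h' | ⟨h', htail⟩⟩
        · exact Or.inl (h1.mpr (Or.inl h))
        · exact Or.inl (h1.mpr (Or.inr ⟨h, hord.mpr h'⟩))
        · have hcd := hordeq.mpr h'
          subst hcd
          exact Or.inr ⟨rfl, hih.mpr htail⟩

theorem pvInsertBy_congr {α : Type} (b1 b2 : α → α → Bool) (x : α) :
    ∀ acc : List α, (∀ y ∈ acc, b1 x y = b2 x y) →
      PySem.List.insertBy b1 x acc = PySem.List.insertBy b2 x acc := by
  intro acc
  induction acc with
  | nil => intro _; rfl
  | cons y ys ih =>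
    intro h
    rw [PySem.List.insertBy, PySem.List.insertBy, h y (by simp)]
    by_cases hb : b2 x y = true
    · rw [if_pos hb, if_pos hb]
    · rw [if_neg hb, if_neg hb, ih (fun z hz => h z (by simp [hz]))]

theorem pvFoldl_insertBy_congr {α : Type} (b1 b2 : α → α → Bool) (P : α → Prop)
    (hb : ∀ a b, P a → P b → b1 a b = b2 a b) :
    ∀ (l acc : List α), (∀ x ∈ l, P x) → (∀ y ∈ acc, P y) →
      l.foldl (fun acc x => PySem.List.insertBy b1 x acc) acc
        = l.foldl (fun acc x => PySem.List.insertBy b2 x acc) acc := by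
  intro l
  induction l with
  | nil => intro acc _ _; rfl
  | cons x l' ih =>
    intro acc hl hacc
    rw [List.foldl_cons, List.foldl_cons,
      pvInsertBy_congr b1 b2 x acc (fun y hy => hb x y (hl x (by simp)) (hacc y hy))]
    exact ih _ (fun z hz => hl z (by simp [hz])) (fun y hy =>
      (PySem.List.insertBy_mem_iff b2 x y acc).mp hy |>.elim (fun h => h ▸ hl x (by simp))
        (fun h => hacc y h))

-- a stable sort by order-equivalent keys gives the same list
theorem pvSorted_key_congr {α : Type} (xs : List α) (k1 k2 : α → List Int)
    (h : ∀ a ∈ xs, ∀ b ∈ xs, (k1 a < k1 b ↔ k2 a < k2 b)) :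
    PySem.List.sorted xs k1 false = PySem.List.sorted xs k2 false := by
  rw [PySem.List.sorted_eq_foldl_insertBy, PySem.List.sorted_eq_foldl_insertBy]
  exact pvFoldl_insertBy_congr _ _ (fun a => a ∈ xs)
    (fun a b ha hb => by
      rcases h a ha b hb with ⟨h1, h2⟩
      by_cases hk : k1 a < k1 b
      · simp [hk, h1 hk]
      · have hk2 : ¬ k2 a < k2 b := fun hc => hk (h2 hc)
        simp [hk, hk2])
    xs [] (fun x hx => hx) (by simp)

theorem pvMain_eq (xs : List String) :
    sorted_with_weird_order2 xs = sorted_with_weird_order2_alt xs := by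
  unfold sorted_with_weird_order2 sorted_with_weird_order2_alt
  apply pvSorted_key_congr
  intro a ha b hb
  have hcmp : ∀ s : String, pvCmpA (pvDicA xs) s
      = s.toList.map (fun c => (((PySem.List.index? (pvDicA xs) c).getD 0 : Nat) : Int)) := by
    intro s
    unfold pvCmpA
    rw [PySem.List.foldl_append_singleton_eq_map]
    simp
  have hkeyB : ∀ s : String,
      pvKeyB (pvCountB xs) s = s.toList.flatMap (fun c => [-(pvCnt xs c), (c.toNat : Int)]) := by
    intro s
    unfold pvKeyB pvCnt
    simp only [pvCountB_getD]
  rw [hcmp, hcmp, hkeyB, hkeyB]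
  have hmem : ∀ s : String, s ∈ xs → ∀ c ∈ s.toList, c ∈ pvDicA xs := by
    intro s hs c hc
    exact (pvDicA_mem xs c).mpr (List.mem_flatMap.mpr ⟨s, hs, hc⟩)
  exact pvLex_equiv (pvCnt xs)
    (fun c => (((PySem.List.index? (pvDicA xs) c).getD 0 : Nat) : Int)) (pvDicA xs)
    (fun c hc d hd => (pvFA_facts xs c d hc hd).1)
    (fun c hc d hd => (pvFA_facts xs c d hc hd).2)
    a.toList b.toList (hmem a ha) (hmem b hb)

-- ===== VERDICT (by name: the statement is the Claim_ definition above) =====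
theorem sorted_with_weird_order2_spec : Claim_equal_sorted_with_weird_order2 := by
  intro string_list _
  unfold Spec_sorted_with_weird_order2
  exact pvMain_eq string_list
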